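-- pv_equiv track=rewrite | github.com/MrBrantCode/unitest_baseline | mut_generate/mist_train_taco/taco_7674/solution.py | max_unique_boxers
-- ===== SOURCE A (Python) =====
-- def max_unique_boxers(n, weights):
--     from collections import defaultdict
--
--     # Frequency dictionary to count occurrences of each weight
--     freq = defaultdict(int)
--     for weight in weights:
--         freq[weight] += 1
--
--     # Array to track the unique weights we can form
--     unique_weights = [0] * 150002
--
--     # Try to form unique weights by adjusting each weight by -1, 0, or +1
--     for i in range(1, 150002):
--         if i - 1 in freq and freq[i - 1] > 0:
--             unique_weights[i] = 1
--             freq[i - 1] -= 1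
--             continue
--         if i in freq and freq[i] > 0:
--             unique_weights[i] = 1
--             freq[i] -= 1
--             continue
--         if i + 1 in freq and freq[i + 1] > 0:
--             unique_weights[i] = 1
--             freq[i + 1] -= 1
--             continue
--
--     # The result is the sum of all unique weights formed
--     return sum(unique_weights)
-- ===== SOURCE B (Python) =====
-- def max_unique_boxers(n, weights):
--     # Greedy over the sorted weights: give each boxer the smallest still-free
--     # target weight in {w-1, w, w+1} that is >= 1 and <= 150001.
--     count = 0
--     prev = 0  # largest slot assigned so far; slots are taken in increasing order
--     for w in sorted(weights):
--         slot = max(prev + 1, w - 1)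
--         if slot <= w + 1 and slot <= 150001:
--             prev = slot
--             count += 1
--     return count
-- ===== Notes on version B (the rewrite author's own statement) =====
-- stated objective: alternative
-- what changed: Replaces A's fixed scan over all 150001 candidate slots with a frequency dict by a single greedy pass over the sorted weights that assigns each boxer the smallest free slot in {w-1,w,w+1}, tracking only the last slot used.
import Mathlib
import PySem

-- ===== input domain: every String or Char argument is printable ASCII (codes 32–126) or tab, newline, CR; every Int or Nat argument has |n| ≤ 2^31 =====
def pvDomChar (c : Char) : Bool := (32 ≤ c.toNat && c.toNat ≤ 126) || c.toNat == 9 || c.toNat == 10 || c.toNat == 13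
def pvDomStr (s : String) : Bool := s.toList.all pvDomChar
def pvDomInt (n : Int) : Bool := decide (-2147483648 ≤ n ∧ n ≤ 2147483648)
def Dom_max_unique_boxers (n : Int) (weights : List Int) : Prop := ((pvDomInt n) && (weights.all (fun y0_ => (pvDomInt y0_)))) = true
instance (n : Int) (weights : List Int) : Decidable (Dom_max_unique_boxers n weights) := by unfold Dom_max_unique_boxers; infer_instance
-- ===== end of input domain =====

-- B replaces A's fixed scan over all 150001 slots (with a frequency dict) by one greedy
-- pass over the sorted weights assigning each the smallest free slot in {w-1,w,w+1}.


-- ===== PORT A =====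
-- one body of A's slot loop: state = (freq dict, unique_weights array), slot index i
def pvAStep (s : PySem.Dict Int Int × Array Int) (i : Int) : PySem.Dict Int Int × Array Int :=
  let f := s.1
  let u := s.2
  if f.contains (i - 1) && decide (0 < f.getD (i - 1) 0) then
    (f.modify (i - 1) 0 (· - 1), u.setIfInBounds i.toNat 1)
  else if f.contains i && decide (0 < f.getD i 0) then
    (f.modify i 0 (· - 1), u.setIfInBounds i.toNat 1)
  else if f.contains (i + 1) && decide (0 < f.getD (i + 1) 0) then
    (f.modify (i + 1) 0 (· - 1), u.setIfInBounds i.toNat 1)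
  else (f, u)

def max_unique_boxers (n : Int) (weights : List Int) : Int :=
  -- freq = defaultdict(int); for weight in weights: freq[weight] += 1
  let freq : PySem.Dict Int Int := weights.foldl (fun d w => d.modify w 0 (· + 1)) PySem.Dict.empty
  -- unique_weights = [0] * 150002
  let uw : Array Int := Array.replicate 150002 0
  -- for i in range(1, 150002): …
  let res := (PySem.List.pyRange 1 150002 1).foldl pvAStep (freq, uw)
  -- return sum(unique_weights)
  res.2.toList.sum

-- ===== PORT B =====
def max_unique_boxers_alt (n : Int) (weights : List Int) : Int :=
  let res := (PySem.List.sorted weights (fun x => x) false).foldl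
    (fun (s : Int × Int) w =>
      let slot := max (s.2 + 1) (w - 1)
      if slot ≤ w + 1 ∧ slot ≤ 150001 then (s.1 + 1, slot) else s)
    (0, 0)
  res.1

-- ===== PRECONDITION & SPEC =====
def Spec_max_unique_boxers (n : Int) (weights : List Int) (out : Int) : Prop := out = max_unique_boxers_alt n weights
instance (n : Int) (weights : List Int) (out : Int) : Decidable (Spec_max_unique_boxers n weights out) := by unfold Spec_max_unique_boxers; infer_instance

-- ===== CLAIM (what is proved, stated in full; the proofs are below) =====
def Claim_equal_max_unique_boxers : Prop := ∀ (n : Int) (weights : List Int), Dom_max_unique_boxers n weights → Spec_max_unique_boxers n weights (max_unique_boxers n weights)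

-- ===== LEMMAS AND PROOFS =====

-- abstract form of B's greedy (count only; prev is the last slot taken)
def pvG (prev : Int) : List Int → Int
  | [] => 0
  | w :: L =>
    let x := max (prev + 1) (w - 1)
    if x ≤ w + 1 ∧ x ≤ 150001 then 1 + pvG x L else pvG prev L

-- abstract form of A's slot loop over the bag of weights, as a count function c
def pvAloop (i : Int) (c : Int → Int) : Int :=
  if h : i < 150002 then
    if 0 < c (i - 1) then
      1 + pvAloop (i + 1) (fun w => if w = i - 1 then c (i - 1) - 1 else c w)
    else if 0 < c i then
      1 + pvAloop (i + 1) (fun w => if w = i then c i - 1 else c w)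
    else if 0 < c (i + 1) then
      1 + pvAloop (i + 1) (fun w => if w = i + 1 then c (i + 1) - 1 else c w)
    else pvAloop (i + 1) c
  else 0
termination_by (150002 - i).toNat
decreasing_by all_goals omega

theorem pvG_skip (prev w : Int) (L : List Int) (h : w < prev) :
    pvG prev (w :: L) = pvG prev L := by
  simp only [pvG]
  have : ¬ (max (prev + 1) (w - 1) ≤ w + 1 ∧ max (prev + 1) (w - 1) ≤ 150001) := by
    intro hc; omega
  rw [if_neg this]

theorem pvG_skip_all (prev : Int) (P M : List Int) (h : ∀ w ∈ P, w < prev) :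
    pvG prev (P ++ M) = pvG prev M := by
  induction P with
  | nil => rfl
  | cons a P ih =>
      rw [List.cons_append, pvG_skip prev a _ (h a (by simp))]
      exact ih (fun w hw => h w (by simp [hw]))

theorem pvG_stop (prev : Int) (L : List Int) (h : 150001 ≤ prev) : pvG prev L = 0 := by
  induction L with
  | nil => rfl
  | cons w L ih =>
      simp only [pvG]
      have : ¬ (max (prev + 1) (w - 1) ≤ w + 1 ∧ max (prev + 1) (w - 1) ≤ 150001) := by
        intro hc; omega
      rw [if_neg this]
      exact ih

theorem pvG_shift (i : Int) (L : List Int)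
    (h : ∀ w ∈ L, w ≠ i - 1 ∧ w ≠ i ∧ w ≠ i + 1) :
    pvG (i - 1) L = pvG i L := by
  induction L generalizing i with
  | nil => rfl
  | cons w L ih =>
      obtain ⟨h1, h2, h3⟩ := h w (by simp)
      have htail : ∀ w ∈ L, w ≠ i - 1 ∧ w ≠ i ∧ w ≠ i + 1 := fun w hw => h w (by simp [hw])
      by_cases hlo : w ≤ i - 2
      · rw [pvG_skip _ _ _ (by omega), pvG_skip _ _ _ (by omega)]
        exact ih i htail
      · have hhi : i + 2 ≤ w := by omega
        simp only [pvG]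
        have e1 : max ((i - 1) + 1) (w - 1) = w - 1 := by omega
        have e2 : max (i + 1) (w - 1) = w - 1 := by omega
        rw [e1, e2]
        split
        · rfl
        · exact ih i htail

-- a sorted list with a ∈ L splits as (all < a) ++ a :: rest
theorem pv_sorted_decomp (L : List Int) (hL : L.Pairwise (· ≤ ·)) (a : Int) (ha : a ∈ L) :
    ∃ P R, L = P ++ a :: R ∧ (∀ w ∈ P, w < a) ∧ (P ++ R).Pairwise (· ≤ ·) ∧
      L.erase a = P ++ R := by
  induction L with
  | nil => cases ha
  | cons x L ih =>
      by_cases hxa : x = a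
      · refine ⟨[], L, by simp [hxa], by simp, ?_, ?_⟩
        · simpa using (List.pairwise_cons.mp hL).2
        · simp [hxa]
      · have haL : a ∈ L := by
          rcases List.mem_cons.mp ha with h | h
          · exact absurd h.symm hxa
          · exact h
        obtain ⟨P, R, hsplit, hlt, hpw, herase⟩ := ih (List.pairwise_cons.mp hL).2 haL
        have hxle : ∀ y ∈ L, x ≤ y := (List.pairwise_cons.mp hL).1
        refine ⟨x :: P, R, by simp [hsplit], ?_, ?_, ?_⟩
        · intro w hw
          rcases List.mem_cons.mp hw with h | h
          · subst h
            have := hxle a haL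
            omega
          · exact hlt w h
        · rw [List.cons_append, List.pairwise_cons]
          refine ⟨fun y hy => ?_, hpw⟩
          have : y ∈ P ++ R := hy
          have : y ∈ L := by
            rw [hsplit]
            rcases List.mem_append.mp hy with h | h
            · exact List.mem_append.mpr (Or.inl h)
            · exact List.mem_append.mpr (Or.inr (by simp [h]))
          exact hxle y this
        · rw [List.erase_cons, if_neg (by simpa using hxa), herase, List.cons_append]

theorem pv_count_erase (L : List Int) (a w : Int) :
    ((L.erase a).count w : Int) = (if w = a ∧ a ∈ L then (L.count w : Int) - 1 else (L.count w : Int)) := by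
  by_cases hw : w = a
  · subst hw
    by_cases ha : w ∈ L
    · have h2 : 1 ≤ L.count w := List.one_le_count_iff.mpr ha
      rw [List.count_erase_self, if_pos ⟨rfl, ha⟩]
      omega
    · rw [List.erase_of_not_mem ha, if_neg (fun h => ha h.2)]
  · rw [List.count_erase_of_ne hw, if_neg (fun h => hw h.1)]

-- the main bridge: A's abstract slot loop on the counts of a sorted list L is B's greedy
theorem pv_aloop_eq_g (k : Nat) (i : Int) (hi : 1 ≤ i) (hk : 150002 - i = k)
    (L : List Int) (hL : L.Pairwise (· ≤ ·)) :
    pvAloop i (fun w => (L.count w : Int)) = pvG (i - 1) L := by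
  induction k generalizing i L with
  | zero =>
      have : ¬ i < 150002 := by omega
      rw [pvAloop, dif_neg this, pvG_stop (i - 1) L (by omega)]
  | succ k ih =>
      have hlt : i < 150002 := by omega
      rw [pvAloop, dif_pos hlt]
      by_cases h1 : 0 < ((L.count (i - 1) : Nat) : Int)
      · -- branch 1: a boxer of weight i-1 takes slot i
        have hmem : (i - 1) ∈ L := List.count_pos_iff.mp (by exact_mod_cast h1)
        obtain ⟨P, R, hsplit, hlt', hpw, herase⟩ := pv_sorted_decomp L hL _ hmem
        rw [if_pos h1]
        have hce : (fun w => if w = i - 1 then ((L.count (i - 1) : Nat) : Int) - 1 else ((L.count w : Nat) : Int))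
            = (fun w => ((L.erase (i - 1)).count w : Int)) := by
          funext w
          rw [pv_count_erase L (i - 1) w]
          by_cases hw : w = i - 1 <;> simp [hw, hmem]
        rw [hce, ih (i + 1) (by omega) (by omega) (L.erase (i - 1)) (herase ▸ hpw)]
        rw [herase, hsplit]
        rw [pvG_skip_all (i - 1) P _ (fun w hw => hlt' w hw)]
        have : pvG ((i + 1) - 1) (P ++ R) = pvG i R := by
          rw [show (i + 1) - 1 = i from by ring,
              pvG_skip_all i P R (fun w hw => by have := hlt' w hw; omega)]
        rw [this]
        simp only [pvG]
        have e1 : max ((i - 1) + 1) ((i - 1) - 1) = i := by omega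
        rw [e1, if_pos ⟨by omega, by omega⟩]
      · by_cases h2 : 0 < ((L.count i : Nat) : Int)
        · -- branch 2: a boxer of weight i keeps slot i
          have hmem : i ∈ L := List.count_pos_iff.mp (by exact_mod_cast h2)
          have hno : (i - 1) ∉ L := by
            intro h
            exact h1 (by exact_mod_cast List.count_pos_iff.mpr h)
          obtain ⟨P, R, hsplit, hlt', hpw, herase⟩ := pv_sorted_decomp L hL _ hmem
          rw [if_neg h1, if_pos h2]
          have hce : (fun w => if w = i then ((L.count i : Nat) : Int) - 1 else ((L.count w : Nat) : Int))
              = (fun w => ((L.erase i).count w : Int)) := by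
            funext w
            rw [pv_count_erase L i w]
            by_cases hw : w = i <;> simp [hw, hmem]
          rw [hce, ih (i + 1) (by omega) (by omega) (L.erase i) (herase ▸ hpw)]
          have hPsmall : ∀ w ∈ P, w < i - 1 := by
            intro w hw
            have h1' : w < i := hlt' w hw
            have : w ≠ i - 1 := by
              intro he
              exact hno (he ▸ (hsplit ▸ List.mem_append.mpr (Or.inl hw)))
            omega
          rw [herase, hsplit]
          rw [pvG_skip_all (i - 1) P _ (fun w hw => by have := hPsmall w hw; omega)]
          have : pvG ((i + 1) - 1) (P ++ R) = pvG i R := by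
            rw [show (i + 1) - 1 = i from by ring,
                pvG_skip_all i P R (fun w hw => by have := hPsmall w hw; omega)]
          rw [this]
          simp only [pvG]
          have e1 : max ((i - 1) + 1) (i - 1) = i := by omega
          rw [e1, if_pos ⟨by omega, by omega⟩]
        · by_cases h3 : 0 < ((L.count (i + 1) : Nat) : Int)
          · -- branch 3: a boxer of weight i+1 slims to slot i
            have hmem : (i + 1) ∈ L := List.count_pos_iff.mp (by exact_mod_cast h3)
            have hno1 : (i - 1) ∉ L := by
              intro h
              exact h1 (by exact_mod_cast List.count_pos_iff.mpr h)
            have hno2 : i ∉ L := by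
              intro h
              exact h2 (by exact_mod_cast List.count_pos_iff.mpr h)
            obtain ⟨P, R, hsplit, hlt', hpw, herase⟩ := pv_sorted_decomp L hL _ hmem
            rw [if_neg h1, if_neg h2, if_pos h3]
            have hce : (fun w => if w = i + 1 then ((L.count (i + 1) : Nat) : Int) - 1 else ((L.count w : Nat) : Int))
                = (fun w => ((L.erase (i + 1)).count w : Int)) := by
              funext w
              rw [pv_count_erase L (i + 1) w]
              by_cases hw : w = i + 1 <;> simp [hw, hmem]
            rw [hce, ih (i + 1) (by omega) (by omega) (L.erase (i + 1)) (herase ▸ hpw)]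
            have hPsmall : ∀ w ∈ P, w < i - 1 := by
              intro w hw
              have h1' : w < i + 1 := hlt' w hw
              have hmw : w ∈ L := hsplit ▸ List.mem_append.mpr (Or.inl hw)
              have : w ≠ i - 1 := fun he => hno1 (he ▸ hmw)
              have : w ≠ i := fun he => hno2 (he ▸ hmw)
              omega
            rw [herase, hsplit]
            rw [pvG_skip_all (i - 1) P _ (fun w hw => by have := hPsmall w hw; omega)]
            have : pvG ((i + 1) - 1) (P ++ R) = pvG i R := by
              rw [show (i + 1) - 1 = i from by ring,
                  pvG_skip_all i P R (fun w hw => by have := hPsmall w hw; omega)]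
            rw [this]
            simp only [pvG]
            have e1 : max ((i - 1) + 1) ((i + 1) - 1) = i := by omega
            rw [e1, if_pos ⟨by omega, by omega⟩]
          · -- branch 4: nothing near slot i
            have hno1 : (i - 1) ∉ L := fun h => h1 (by exact_mod_cast List.count_pos_iff.mpr h)
            have hno2 : i ∉ L := fun h => h2 (by exact_mod_cast List.count_pos_iff.mpr h)
            have hno3 : (i + 1) ∉ L := fun h => h3 (by exact_mod_cast List.count_pos_iff.mpr h)
            rw [if_neg h1, if_neg h2, if_neg h3]
            rw [ih (i + 1) (by omega) (by omega) L hL]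
            rw [show (i + 1) - 1 = i from by ring]
            refine (pvG_shift i L (by
              intro w hw
              exact ⟨fun he => hno1 (he ▸ hw), fun he => hno2 (he ▸ hw), fun he => hno3 (he ▸ hw)⟩)).symm

-- sum of a list after setting a zero entry to one
theorem pv_sum_set_one (l : List Int) (j : Nat) (hj : j < l.length) (hz : l[j] = 0) :
    (l.set j 1).sum = l.sum + 1 := by
  have h1 := List.sum_take_add_sum_drop l j
  have h2 : l.drop j = l[j] :: l.drop (j + 1) := List.drop_eq_getElem_cons hj
  rw [h2, List.sum_cons, hz] at h1
  rw [List.sum_set, if_pos hj]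
  omega

-- A's concrete fold computes its start sum plus the abstract slot loop
theorem pv_foldA (k : Nat) (i : Int) (hi : 1 ≤ i) (hk : (150002 - i).toNat = k)
    (f : PySem.Dict Int Int) (u : Array Int) (hlen : u.toList.length = 150002)
    (hz : ∀ j : Nat, i ≤ (j : Int) → j < 150002 → u.toList[j]! = 0) :
    (((PySem.List.pyRange i 150002 1).foldl pvAStep (f, u)).2).toList.sum
      = u.toList.sum + pvAloop i (fun w => f.getD w 0) := by
  induction k generalizing i f u with
  | zero =>
      have hge : (150002 : Int) ≤ i := by omega
      rw [PySem.List.pyRange_one_eq_nil hge, List.foldl_nil, pvAloop, dif_neg (by omega)]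
      ring
  | succ k ih =>
      have hlt : i < 150002 := by omega
      rw [PySem.List.pyRange_one_cons hlt, List.foldl_cons]
      have hidx : i.toNat < u.toList.length := by rw [hlen]; omega
      have hget : u.toList[i.toNat] = 0 := by
        have := hz i.toNat (by omega) (by omega)
        rwa [List.getElem!_eq_getElem?_getD, List.getElem?_eq_getElem hidx, Option.getD_some] at this
      have hsz : i.toNat < u.size := by rwa [Array.length_toList] at hidx
      have hsetlist : (u.setIfInBounds i.toNat 1).toList = u.toList.set i.toNat 1 := by
        simp [Array.setIfInBounds, hsz]
      have hsetsum : (u.setIfInBounds i.toNat 1).toList.sum = u.toList.sum + 1 := by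
        rw [hsetlist, pv_sum_set_one _ _ hidx hget]
      have hsetlen : (u.setIfInBounds i.toNat 1).toList.length = 150002 := by
        rw [hsetlist, List.length_set, hlen]
      have hsetz : ∀ j : Nat, i + 1 ≤ (j : Int) → j < 150002 → (u.setIfInBounds i.toNat 1).toList[j]! = 0 := by
        intro j hj1 hj2
        rw [hsetlist]
        have hne : j ≠ i.toNat := by omega
        have hjlt : j < (u.toList.set i.toNat 1).length := by rw [List.length_set, hlen]; exact hj2
        rw [List.getElem!_eq_getElem?_getD, List.getElem?_eq_getElem hjlt, Option.getD_some,
          List.getElem_set_ne (by omega)]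
        have := hz j (by omega) hj2
        have hjl : j < u.toList.length := by rw [hlen]; exact hj2
        rwa [List.getElem!_eq_getElem?_getD, List.getElem?_eq_getElem hjl, Option.getD_some] at this
      have hzz : ∀ j : Nat, i + 1 ≤ (j : Int) → j < 150002 → u.toList[j]! = 0 :=
        fun j hj1 hj2 => hz j (by omega) hj2
      -- rewrite the guards of pvAStep into pure count conditions
      have hcond : ∀ (d : PySem.Dict Int Int) (x : Int),
          (d.contains x && decide (0 < d.getD x 0)) = decide (0 < d.getD x 0) := by
        intro d x
        cases hc : d.contains x with
        | true => simp
        | false =>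
            rw [PySem.Dict.getD_of_not_contains d 0 hc]
            simp
      have hgd : ∀ (x : Int), (fun w => (f.modify x 0 (· - 1)).getD w 0)
          = (fun w => if w = x then f.getD x 0 - 1 else f.getD w 0) := by
        intro x
        funext w
        rw [PySem.Dict.getD_modify]
      simp only [pvAStep, hcond]
      rw [pvAloop, dif_pos hlt]
      by_cases h1 : 0 < f.getD (i - 1) 0
      · rw [if_pos (by simpa using h1), if_pos h1,
          ih (i + 1) (by omega) (by omega) _ _ hsetlen hsetz, hsetsum, hgd]
        ring
      · rw [if_neg (by simpa using h1), if_neg h1]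
        by_cases h2 : 0 < f.getD i 0
        · rw [if_pos (by simpa using h2), if_pos h2,
            ih (i + 1) (by omega) (by omega) _ _ hsetlen hsetz, hsetsum, hgd]
          ring
        · rw [if_neg (by simpa using h2), if_neg h2]
          by_cases h3 : 0 < f.getD (i + 1) 0
          · rw [if_pos (by simpa using h3), if_pos h3,
              ih (i + 1) (by omega) (by omega) _ _ hsetlen hsetz, hsetsum, hgd]
            ring
          · rw [if_neg (by simpa using h3), if_neg h3,
              ih (i + 1) (by omega) (by omega) f u hlen hzz]

-- B's fold accumulates its counter on top of pvG
theorem pv_foldB (L : List Int) (cnt prev : Int) :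
    (L.foldl (fun (s : Int × Int) w =>
        let slot := max (s.2 + 1) (w - 1)
        if slot ≤ w + 1 ∧ slot ≤ 150001 then (s.1 + 1, slot) else s) (cnt, prev)).1
      = cnt + pvG prev L := by
  induction L generalizing cnt prev with
  | nil => simp [pvG]
  | cons w L ih =>
      rw [List.foldl_cons]
      simp only [pvG]
      split
      · rw [ih]; ring
      · rw [ih]

-- ===== VERDICT (by name: the statement is the Claim_ definition above) =====
theorem max_unique_boxers_spec : Claim_equal_max_unique_boxers := by
  intro n weights _
  unfold Spec_max_unique_boxers max_unique_boxers max_unique_boxers_alt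
  rw [pv_foldB (PySem.List.sorted weights (fun x => x) false) 0 0]
  rw [pv_foldA ((150002 : Int) - 1).toNat 1 le_rfl rfl _ _
    (by rw [Array.toList_replicate, List.length_replicate]) (by
    intro j hj1 hj2
    rw [Array.toList_replicate]
    have hl : j < (List.replicate 150002 (0 : Int)).length := by
      rw [List.length_replicate]; exact hj2
    rw [List.getElem!_eq_getElem?_getD, List.getElem?_eq_getElem hl, Option.getD_some,
      List.getElem_replicate])]
  have hfreq : (fun w => (weights.foldl (fun d w => d.modify w 0 (· + 1)) PySem.Dict.empty).getD w 0)
      = (fun w => (((PySem.List.sorted weights (fun x => x) false).count w : Nat) : Int)) := by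
    funext w
    rw [PySem.Dict.getD_foldl_modify_add_one, PySem.Dict.getD_empty]
    have := (PySem.List.sorted_perm weights (fun x => x) false).count_eq w
    omega
  rw [hfreq, pv_aloop_eq_g ((150002 : Int) - 1).toNat 1 le_rfl (by norm_num) _
    (by simpa using PySem.List.sorted_pairwise weights (fun x => x))]
  have : (Array.replicate 150002 (0 : Int)).toList.sum = 0 := by
    rw [Array.toList_replicate, List.sum_replicate]; simp
  rw [this, show (1 : Int) - 1 = 0 from rfl]
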